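-- pv_equiv track=rewrite | github.com/gomanish/Hackerrank_practics_problem | capitalize.py | solve
-- ===== SOURCE A (Python) =====
-- def solve(s):
--     go=True
--     word=[]
--     for w in s.split():
--         word.append(w.capitalize())
--     temp=''
--     i=0
--     for w1 in s:
--         if w1 == ' ':
--             temp=temp+w1
--             go=True
--         else:
--             if go:
--                 temp=temp+word[i]
--                 i+=1
--                 go=False
--     return temp
-- ===== SOURCE B (Python) =====
-- def solve(s):
--     words = [w[:1].upper() + w[1:].lower() for w in s.split()]
--
--     def rebuild(pieces, i):
--         if not pieces:
--             return []
--         head, rest = pieces[0], pieces[1:]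
--         if head:
--             return [words[i]] + rebuild(rest, i + 1)
--         return [''] + rebuild(rest, i)
--
--     return ' '.join(rebuild(s.split(' '), 0))
-- ===== Notes on version B (the rewrite author's own statement) =====
-- stated objective: alternative
-- what changed: B replaces A's character-by-character scan with its boolean go-flag and manual word-index bookkeeping by a recursive token-level reconstruction: split the string on single spaces, recursively map each non-empty piece to the next capitalized word of the whitespace split (empty pieces stay empty), and re-join with spaces.
import Mathlib
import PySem

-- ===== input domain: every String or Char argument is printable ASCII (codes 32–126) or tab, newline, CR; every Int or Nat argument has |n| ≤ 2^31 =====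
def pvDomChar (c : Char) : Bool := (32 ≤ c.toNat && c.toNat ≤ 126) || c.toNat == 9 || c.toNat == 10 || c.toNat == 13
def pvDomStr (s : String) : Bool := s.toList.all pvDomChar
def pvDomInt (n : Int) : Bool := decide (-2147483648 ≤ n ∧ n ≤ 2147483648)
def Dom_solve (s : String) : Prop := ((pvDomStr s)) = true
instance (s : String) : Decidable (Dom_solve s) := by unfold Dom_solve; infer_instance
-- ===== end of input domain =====

-- B replaces A's character-by-character scan with its boolean flag by a recursive
-- token-level reconstruction over the string split on single spaces (objective: alternative).
-- Equivalence is about return values (neither program mutates its argument).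

-- ===== PORT A =====
-- A-side helper: w.capitalize()
def pvCapA (w : List Char) : List Char :=
  match w with
  | [] => []
  | c :: rest => PySem.Chars.upperChar c :: PySem.Chars.lower rest

-- A's loop state = (go, i, temp); word[i] is pyGetD under Pre_ (Python raises IndexError out of range)
def solveStep (words : List (List Char)) (st : Bool × Nat × List Char) (c : Char) :
    Bool × Nat × List Char :=
  if c = ' ' then (true, st.2.1, st.2.2 ++ [c])
  else if st.1 then (false, st.2.1 + 1, st.2.2 ++ PySem.List.pyGetD words (st.2.1 : Int) [])
  else st

def solve (s : String) : String :=
  let words := (PySem.Chars.split₀ s.toList).map pvCapA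
  let r := s.toList.foldl (solveStep words) (true, 0, [])
  String.ofList r.2.2

-- ===== PORT B =====
-- B-side helper: w[:1].upper() + w[1:].lower()
def pvCapB (w : List Char) : List Char :=
  PySem.Chars.upper (w.take 1) ++ PySem.Chars.lower (w.drop 1)

-- B's recursive rebuild(pieces, i): non-empty piece → words[i], empty piece → ''
def solveRebuild (words : List (List Char)) : List (List Char) → Nat → List (List Char)
  | [], _ => []
  | p :: rest, i =>
    if p.isEmpty then [] :: solveRebuild words rest i
    else PySem.List.pyGetD words (i : Int) [] :: solveRebuild words rest (i + 1)

def solve_alt (s : String) : String :=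
  let words := (PySem.Chars.split₀ s.toList).map pvCapB
  String.ofList (PySem.Chars.join [' '] (solveRebuild words (PySem.Chars.splitOn s.toList [' ']) 0))

-- ===== PRECONDITION & SPEC =====
-- Pre_ excludes exactly the inputs where Python A raises IndexError (strings with more
-- non-empty single-space-split pieces than whitespace-split words, i.e. a piece made only
-- of tabs/newlines); Python B raises IndexError on exactly those inputs too.
def Pre_solve (s : String) : Prop :=
  (PySem.Chars.splitOn s.toList [' ']).countP (fun p => !p.isEmpty)
    ≤ (PySem.Chars.split₀ s.toList).length

instance (s : String) : Decidable (Pre_solve s) := by unfold Pre_solve; infer_instance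

def pvWitness_solve : String := "hello  world of code"

def Spec_solve (s : String) (out : String) : Prop := out = solve_alt s
instance (s : String) (out : String) : Decidable (Spec_solve s out) := by unfold Spec_solve; infer_instance

-- ===== CLAIM (what is proved, stated in full; the proofs are below) =====
def Claim_equal_solve : Prop := ∀ (s : String), Dom_solve s → Pre_solve s → Spec_solve s (solve s)

-- ===== LEMMAS AND PROOFS =====

-- the two capitalizations agree
theorem pvCapB_eq_pvCapA (w : List Char) : pvCapB w = pvCapA w := by
  cases w with
  | nil => rfl
  | cons c rest => simp [pvCapB, pvCapA, PySem.Chars.upper]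

-- clean recursion computing splitOn with separator [' ']
def pvSplitAux : List Char → List Char → List (List Char)
  | [], cur => [cur.reverse]
  | c :: rest, cur =>
    if c = ' ' then cur.reverse :: pvSplitAux rest [] else pvSplitAux rest (c :: cur)

theorem pvSplitOn_go_eq (fuel : Nat) :
    ∀ (l cur : List Char) (acc : List (List Char)), l.length ≤ fuel →
      PySem.Chars.splitOn.go [' '] fuel l cur acc = acc.reverse ++ pvSplitAux l cur := by
  induction fuel with
  | zero =>
    intro l cur acc h
    have hl : l = [] := by cases l <;> simp_all
    subst hl
    rw [PySem.Chars.splitOn.go.eq_def]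
    simp [pvSplitAux]
  | succ n ih =>
    intro l cur acc h
    cases l with
    | nil =>
      rw [PySem.Chars.splitOn.go.eq_def]
      simp [pvSplitAux]
    | cons c rest =>
      rw [PySem.Chars.splitOn.go.eq_def]
      simp only [List.isPrefixOf, Bool.and_true, List.length_singleton]
      by_cases hc : c = ' '
      · subst hc
        rw [if_pos (by simp)]
        rw [ih (List.drop 1 (' ' :: rest)) [] (cur.reverse :: acc)
              (by simp at h ⊢; omega)]
        simp [pvSplitAux]
      · rw [if_neg (by simp; exact fun h' => hc h'.symm)]
        rw [ih rest (c :: cur) acc (by simp at h; omega)]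
        simp [pvSplitAux, hc]

theorem pvSplitOn_space (s : List Char) :
    PySem.Chars.splitOn s [' '] = pvSplitAux s [] := by
  unfold PySem.Chars.splitOn
  rw [pvSplitOn_go_eq (s.length + 1) s [] [] (by omega)]
  simp

theorem pvSplitAux_ne_nil (l cur : List Char) : pvSplitAux l cur ≠ [] := by
  induction l generalizing cur with
  | nil => simp [pvSplitAux]
  | cons c rest ih => simp only [pvSplitAux]; split <;> simp [ih]

theorem pvIntercalate_cons {α : Type} (sep a : List α) (l : List (List α)) (h : l ≠ []) :
    List.intercalate sep (a :: l) = a ++ sep ++ List.intercalate sep l := by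
  cases l with
  | nil => exact absurd rfl h
  | cons b t => simp [List.intercalate, List.intersperse]

theorem pvIntercalate_pvSplitAux :
    ∀ (l cur : List Char), List.intercalate [' '] (pvSplitAux l cur) = cur.reverse ++ l := by
  intro l
  induction l with
  | nil => intro cur; simp [pvSplitAux, List.intercalate]
  | cons c rest ih =>
    intro cur
    by_cases hc : c = ' '
    · subst hc
      simp only [pvSplitAux, reduceIte]
      rw [pvIntercalate_cons [' '] cur.reverse (pvSplitAux rest []) (pvSplitAux_ne_nil rest [])]
      rw [ih []]
      simp
    · simp only [pvSplitAux, if_neg hc]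
      rw [ih (c :: cur)]
      simp

theorem pvSplitAux_no_space :
    ∀ (l cur : List Char), (' ' ∉ cur) → ∀ p ∈ pvSplitAux l cur, ' ' ∉ p := by
  intro l
  induction l with
  | nil =>
    intro cur hcur p hp
    simp [pvSplitAux] at hp; subst hp; simpa using hcur
  | cons c rest ih =>
    intro cur hcur p hp
    by_cases hc : c = ' '
    · subst hc
      simp only [pvSplitAux, reduceIte, List.mem_cons] at hp
      rcases hp with h | h
      · subst h; simpa using hcur
      · exact ih [] (by simp) p h
    · simp only [pvSplitAux, if_neg hc] at hp
      exact ih (c :: cur) (by simp [hcur]; exact fun h => hc h.symm) p hp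

-- A-side: a run of non-space characters with go = False leaves the state unchanged
theorem pvFoldA_false (words : List (List Char)) :
    ∀ (p : List Char), (' ' ∉ p) → ∀ (i : Nat) (t : List Char),
      p.foldl (solveStep words) (false, i, t) = (false, i, t) := by
  intro p
  induction p with
  | nil => intro _ i t; rfl
  | cons c rest ih =>
    intro hp i t
    have hc : c ≠ ' ' := fun h => hp (h ▸ List.mem_cons_self)
    simp only [List.foldl_cons, solveStep, if_neg hc]
    exact ih (fun h => hp (List.mem_cons_of_mem _ h)) i t

-- A-side: a non-empty run of non-space characters with go = True appends word[i] once
theorem pvFoldA_true (words : List (List Char)) (p : List Char) (hne : p ≠ []) (hp : ' ' ∉ p)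
    (i : Nat) (t : List Char) :
    p.foldl (solveStep words) (true, i, t)
      = (false, i + 1, t ++ PySem.List.pyGetD words (i : Int) []) := by
  cases p with
  | nil => exact absurd rfl hne
  | cons c rest =>
    have hc : c ≠ ' ' := fun h => hp (h ▸ List.mem_cons_self)
    simp only [List.foldl_cons, solveStep, if_neg hc, reduceIte]
    exact pvFoldA_false words rest (fun h => hp (List.mem_cons_of_mem _ h)) _ _

theorem pvRebuild_ne_nil (words : List (List Char)) (ps : List (List Char)) (hne : ps ≠ [])
    (i : Nat) : solveRebuild words ps i ≠ [] := by
  cases ps with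
  | nil => exact absurd rfl hne
  | cons p rest => simp only [solveRebuild]; split <;> simp

-- main invariant: A's scan of ' '-intercalated space-free pieces, started with go = True,
-- appends exactly the ' '-intercalation of B's recursively rebuilt per-piece list
theorem pvMain (words : List (List Char)) :
    ∀ (pieces : List (List Char)), (∀ p ∈ pieces, ' ' ∉ p) →
      ∀ (i : Nat) (t : List Char),
        ((List.intercalate [' '] pieces).foldl (solveStep words) (true, i, t)).2.2
          = t ++ List.intercalate [' '] (solveRebuild words pieces i) := by
  intro pieces
  induction pieces with
  | nil => intro _ i t; simp [List.intercalate, solveRebuild]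
  | cons p ps ih =>
    intro hns i t
    have hp : ' ' ∉ p := hns p List.mem_cons_self
    have hps : ∀ q ∈ ps, ' ' ∉ q := fun q hq => hns q (List.mem_cons_of_mem _ hq)
    cases ps with
    | nil =>
      -- single piece: intercalate [p] = p, solveRebuild gives one entry
      by_cases hpe : p.isEmpty
      · have : p = [] := by simpa [List.isEmpty_iff] using hpe
        subst this
        simp [List.intercalate, solveRebuild]
      · have hne : p ≠ [] := by simpa [List.isEmpty_iff] using hpe
        have hsing : List.intercalate [' '] [p] = p := by simp [List.intercalate]
        rw [hsing]
        rw [pvFoldA_true words p hne hp i t]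
        simp [solveRebuild, hpe, List.intercalate]
    | cons q qs =>
      have hql : List.intercalate [' '] (p :: q :: qs)
          = p ++ ' ' :: List.intercalate [' '] (q :: qs) := by
        rw [pvIntercalate_cons [' '] p (q :: qs) (by simp)]; simp
      rw [hql]
      have hbne : solveRebuild words (q :: qs) i ≠ [] := pvRebuild_ne_nil words _ (by simp) i
      by_cases hpe : p.isEmpty
      · have hpnil : p = [] := by simpa [List.isEmpty_iff] using hpe
        subst hpnil
        simp only [List.nil_append, List.foldl_cons, solveStep, reduceIte]
        rw [ih hps i (t ++ [' '])]
        have hbm : solveRebuild words ([] :: q :: qs) i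
            = [] :: solveRebuild words (q :: qs) i := by
          simp [solveRebuild]
        rw [hbm, pvIntercalate_cons [' '] [] _ hbne]
        simp
      · have hne : p ≠ [] := by simpa [List.isEmpty_iff] using hpe
        rw [List.foldl_append, pvFoldA_true words p hne hp i t]
        simp only [List.foldl_cons, solveStep, reduceIte]
        rw [ih hps (i + 1) (t ++ PySem.List.pyGetD words (i : Int) [] ++ [' '])]
        have hbne' : solveRebuild words (q :: qs) (i + 1) ≠ [] :=
          pvRebuild_ne_nil words _ (by simp) _
        have hbm : solveRebuild words (p :: q :: qs) i
            = PySem.List.pyGetD words (i : Int) [] :: solveRebuild words (q :: qs) (i + 1) := by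
          simp [solveRebuild, hpe]
        rw [hbm, pvIntercalate_cons [' '] _ _ hbne']
        simp

-- ===== VERDICT (by name: the statement is the Claim_ definition above) =====
theorem solve_spec : Claim_equal_solve := by
  intro s _ _
  unfold Spec_solve solve solve_alt
  have hcap : (PySem.Chars.split₀ s.toList).map pvCapB
      = (PySem.Chars.split₀ s.toList).map pvCapA := by
    simp [pvCapB_eq_pvCapA]
  rw [hcap]
  set words := (PySem.Chars.split₀ s.toList).map pvCapA with hw
  have hsplit : PySem.Chars.splitOn s.toList [' '] = pvSplitAux s.toList [] :=
    pvSplitOn_space s.toList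
  have hs : s.toList = List.intercalate [' '] (pvSplitAux s.toList []) := by
    rw [pvIntercalate_pvSplitAux s.toList []]; simp
  have hns : ∀ p ∈ pvSplitAux s.toList [], ' ' ∉ p :=
    pvSplitAux_no_space s.toList [] (by simp)
  simp only [hsplit]
  conv_lhs => rw [hs]
  rw [pvMain words (pvSplitAux s.toList []) hns 0 []]
  simp [PySem.Chars.join]
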